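-- pv_equiv track=rewrite | github.com/iptch/2023-advent-of-code | JDE/day04/main.py | part2
-- ===== SOURCE A (Python) =====
-- def part2(data):
--     if data == []:
--         return "missing"
--     queue = len(data) * [1]
--     numcards = 0
--     for line in data:
--         winning = set()
--         my = []
--         mymode = False
--         wins = 0
--         asd = line.split(' ')[2:]
--         for l in asd:
--             if l == '|':
--                 mymode = True
--             elif ':' in l or 'Card' in l:
--                 continue
--             elif l == '':
--                 continue
--
--             elif not mymode:
--                 winning.add(int(l))
--             else:
--                 num = int(l)
--                 my.append(int(l))
--                 if num in winning:
--                     wins += 1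
--         addcards = 0
--         if len(queue):
--             addcards += queue.pop(0)
--         numcards += addcards
--
--         newqueue = wins*[addcards]
--         for indx, s in enumerate(newqueue):
--             if indx >= len(queue):
--                 break
--             else:
--                 queue[indx] += addcards
--     return numcards
-- ===== SOURCE B (Python) =====
-- def _wins(line):
--     winning = set()
--     mymode = False
--     w = 0
--     for tok in line.split(' ')[2:]:
--         if tok == '|':
--             mymode = True
--         elif ':' in tok or 'Card' in tok:
--             continue
--         elif tok == '':
--             continue
--         elif not mymode:
--             winning.add(int(tok))
--         elif int(tok) in winning:
--             w += 1
--     return w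
--
--
-- def part2(data):
--     if data == []:
--         return "missing"
--     wins = [_wins(line) for line in data]
--     n = len(data)
--     counts = n * [1]
--     total = 0
--     for i, w in enumerate(wins):
--         c = counts[i]
--         total += c
--         for j in range(i + 1, min(n, i + 1 + w)):
--             counts[j] += c
--     return total
-- ===== Notes on version B (the rewrite author's own statement) =====
-- stated objective: faster
-- what changed: A interleaves parsing with a shrinking pop(0) queue of pending copy counts (each pop shifts the whole queue); B first computes each card's match count, then propagates copies over a fixed index-addressed counts array in a second pass.
-- outside the precondition, e.g. on part2([]): A returns 'missing', B returns 'missing'; on part2(['Card 1: x | 1']): A raises ValueError, B raises ValueError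
import Mathlib
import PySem

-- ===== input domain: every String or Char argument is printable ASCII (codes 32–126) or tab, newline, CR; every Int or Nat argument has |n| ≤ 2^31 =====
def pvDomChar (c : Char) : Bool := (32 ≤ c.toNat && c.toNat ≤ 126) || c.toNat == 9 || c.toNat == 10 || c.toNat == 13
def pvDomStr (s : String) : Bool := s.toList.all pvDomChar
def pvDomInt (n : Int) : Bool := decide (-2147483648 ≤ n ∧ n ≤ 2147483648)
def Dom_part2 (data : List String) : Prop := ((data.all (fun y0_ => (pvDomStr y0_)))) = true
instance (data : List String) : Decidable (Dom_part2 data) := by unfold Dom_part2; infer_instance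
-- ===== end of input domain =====

-- B re-implements A's queue/pop(0) card propagation as two passes (per-line win counts, then an
-- index-addressed counts array); same return value on Pre_ (alternative decomposition).

-- ===== PORT A =====
-- body of A's inner `for l in asd` loop; state ps = (winning, my, mymode, wins).
-- int(l) raises ValueError on invalid tokens: Pre_part2 excludes those inputs, so `.getD 0` is never taken.
def tokStepA (ps : PySem.Set Int × List Int × Bool × Int) (l : String) :
    PySem.Set Int × List Int × Bool × Int :=
  if l = "|" then (ps.1, ps.2.1, true, ps.2.2.2)
  else if PySem.Str.isIn ":" l || PySem.Str.isIn "Card" l then ps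
  else if l = "" then ps
  else if !ps.2.2.1 then
    (PySem.Set.add ps.1 ((PySem.Int.ofStr? l).getD 0), ps.2.1, ps.2.2.1, ps.2.2.2)
  else
    (ps.1, ps.2.1 ++ [(PySem.Int.ofStr? l).getD 0], ps.2.2.1,
      if PySem.Set.contains ps.1 ((PySem.Int.ofStr? l).getD 0) then ps.2.2.2 + 1 else ps.2.2.2)

-- `for indx, s in enumerate(wins*[addcards]): if indx >= len(queue): break; else queue[indx] += addcards`:
-- indx runs 0,1,…,wins-1 over the replicated list and the break fires exactly when the queue is exhausted.
def bumpA : List Int → Nat → Int → List Int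
  | q, 0, _ => q
  | [], _ + 1, _ => []
  | x :: q, w + 1, a => (x + a) :: bumpA q w a

-- body of A's `for line in data` loop; state st = (queue, numcards).
-- queue.pop(0) is guarded by `if len(queue)`, so the pop? default is never taken.
def lineStepA (st : List Int × Int) (line : String) : List Int × Int :=
  let asd := PySem.List.slice ((PySem.Str.split? line " ").getD []) (some 2) none
  let wins := (asd.foldl tokStepA (PySem.Set.empty, [], false, 0)).2.2.2
  let pr := if st.1.length ≠ 0 then (PySem.List.pop? st.1 0).getD (0, st.1) else (0, st.1)
  (bumpA pr.2 wins.toNat pr.1, st.2 + pr.1)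

-- A returns the string "missing" on data == [] (not an Int); Pre_part2 excludes that input.
def part2 (data : List String) : Int :=
  if data = [] then 0
  else (data.foldl lineStepA (List.replicate data.length 1, 0)).2

-- ===== PORT B =====
-- body of _wins's token loop; state ps = (winning, mymode, w).
def tokStepB (ps : PySem.Set Int × Bool × Int) (tok : String) : PySem.Set Int × Bool × Int :=
  if tok = "|" then (ps.1, true, ps.2.2)
  else if PySem.Str.isIn ":" tok || PySem.Str.isIn "Card" tok then ps
  else if tok = "" then ps
  else if !ps.2.1 then (PySem.Set.add ps.1 ((PySem.Int.ofStr? tok).getD 0), ps.2.1, ps.2.2)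
  else if PySem.Set.contains ps.1 ((PySem.Int.ofStr? tok).getD 0) then (ps.1, ps.2.1, ps.2.2 + 1)
  else ps

def winsOf (line : String) : Int :=
  ((PySem.List.slice ((PySem.Str.split? line " ").getD []) (some 2) none).foldl tokStepB
    (PySem.Set.empty, false, 0)).2.2

-- body of B's `for i, w in enumerate(wins)` loop; state st = (counts, total).
def lineStepB (n : Int) (st : List Int × Int) (p : Int × Int) : List Int × Int :=
  let c := PySem.List.pyGetD st.1 p.1 0
  ((PySem.List.pyRange (p.1 + 1) (min n (p.1 + 1 + p.2)) 1).foldl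
      (fun counts j => PySem.List.pySetD counts j (PySem.List.pyGetD counts j 0 + c)) st.1,
   st.2 + c)

def part2_alt (data : List String) : Int :=
  if data = [] then 0
  else
    ((PySem.List.enumerate (data.map winsOf) 0).foldl (lineStepB data.length)
      (List.replicate data.length 1, 0)).2

-- ===== PRECONDITION & SPEC =====
-- Pre_ excludes [] (A returns the string "missing", not an Int) and lines whose consumed
-- tokens are not valid int() literals (A raises ValueError there).
def Pre_part2 (data : List String) : Prop :=
  data ≠ [] ∧ ∀ line ∈ data,
    ∀ tok ∈ PySem.List.slice ((PySem.Str.split? line " ").getD []) (some 2) none,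
      (tok ≠ "|" ∧ PySem.Str.isIn ":" tok = false ∧ PySem.Str.isIn "Card" tok = false ∧ tok ≠ "") →
        (PySem.Int.ofStr? tok).isSome = true
instance (data : List String) : Decidable (Pre_part2 data) := by unfold Pre_part2; infer_instance

def pvWitness_part2 : List String := ["Card 1: 1 2 | 2 3", "Card 2: 5 | 5"]

def Spec_part2 (data : List String) (out : Int) : Prop := out = part2_alt data
instance (data : List String) (out : Int) : Decidable (Spec_part2 data out) := by unfold Spec_part2; infer_instance

-- ===== CLAIM (what is proved, stated in full; the proofs are below) =====
def Claim_equal_part2 : Prop := ∀ (data : List String), Dom_part2 data → Pre_part2 data → Spec_part2 data (part2 data)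

-- ===== LEMMAS AND PROOFS =====

-- common model of the propagation: per-line win counts against the pending queue of copy counts
def modelF : List Int → List Int → Int
  | [], _ => 0
  | _ :: ws, [] => modelF ws []
  | w :: ws, c :: q => c + modelF ws (bumpA q w.toNat c)

theorem bumpA_nil (w : Nat) (a : Int) : bumpA [] w a = [] := by cases w <;> rfl

theorem tokfold_eq (toks : List String) :
    ∀ (wn : PySem.Set Int) (my : List Int) (mm : Bool) (w : Int),
      (toks.foldl tokStepA (wn, my, mm, w)).2.2.2 = (toks.foldl tokStepB (wn, mm, w)).2.2 := by
  induction toks with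
  | nil => intro wn my mm w; rfl
  | cons t ts ih =>
    intro wn my mm w
    simp only [List.foldl, tokStepA, tokStepB]
    split_ifs <;> apply ih

theorem foldA_eq (lines : List String) :
    ∀ (q : List Int) (m : Int),
      (lines.foldl lineStepA (q, m)).2 = m + modelF (lines.map winsOf) q := by
  induction lines with
  | nil => intro q m; simp [modelF]
  | cons line ls ih =>
    intro q m
    simp only [List.foldl, List.map]
    have hw : (((PySem.List.slice ((PySem.Str.split? line " ").getD []) (some 2) none)).foldl
        tokStepA (PySem.Set.empty, [], false, 0)).2.2.2 = winsOf line := by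
      rw [winsOf, tokfold_eq]
    cases q with
    | nil =>
      simp only [lineStepA, hw]
      simp [modelF, ih, bumpA_nil]
    | cons c q' =>
      simp only [lineStepA, hw]
      simp only [List.length_cons, PySem.List.pop?_zero_cons]
      simp [modelF, ih, add_assoc]

theorem length_bumpA (q : List Int) : ∀ (w : Nat) (a : Int), (bumpA q w a).length = q.length := by
  induction q with
  | nil => intro w a; cases w <;> rfl
  | cons x q ih => intro w a; cases w with | zero => rfl | succ w => simp [bumpA, ih]

theorem bumpA_min (q : List Int) : ∀ (w : Nat) (a : Int), bumpA q w a = bumpA q (min w q.length) a := by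
  induction q with
  | nil => intro w a; cases w <;> rfl
  | cons x q ih =>
    intro w a
    cases w with
    | zero => rfl
    | succ w =>
      simp only [List.length_cons, bumpA, Nat.succ_min_succ]
      rw [ih w a]

theorem innerB_eq (m : Nat) :
    ∀ (a : Nat) (counts : List Int) (c : Int), a + m ≤ counts.length →
      (PySem.List.pyRange (a : Int) ((a : Int) + (m : Int)) 1).foldl
          (fun cs j => PySem.List.pySetD cs j (PySem.List.pyGetD cs j 0 + c)) counts
        = counts.take a ++ bumpA (counts.drop a) m c := by
  induction m with
  | zero =>
    intro a counts c h
    simp only [Nat.cast_zero, add_zero]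
    rw [show PySem.List.pyRange (a : Int) (a : Int) 1 = [] from by simp [PySem.List.pyRange]]
    simp [bumpA]
  | succ m ih =>
    intro a counts c h
    have ha : a < counts.length := by omega
    have hcons : PySem.List.pyRange (a : Int) ((a : Int) + ((m : Nat) + 1 : Nat)) 1
        = (a : Int) :: PySem.List.pyRange ((a : Int) + 1) ((a : Int) + ((m : Nat) + 1 : Nat)) 1 := by
      apply PySem.List.pyRange_one_cons
      push_cast; omega
    rw [hcons]
    simp only [List.foldl]
    have hset : PySem.List.pySetD counts (a : Int) (PySem.List.pyGetD counts (a : Int) 0 + c)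
        = counts.take a ++ (counts[a] + c) :: counts.drop (a + 1) := by
      simp only [PySem.List.pySetD_natCast, PySem.List.pyGetD_natCast]
      rw [List.getD_eq_getElem _ _ ha, List.set_eq_take_append_cons_drop, if_pos ha]
    rw [hset]
    have hcast : (a : Int) + ((m : Nat) + 1 : Nat) = ((a + 1 : Nat) : Int) + (m : Int) := by
      push_cast; ring
    rw [hcast, show ((a : Int) + 1) = ((a + 1 : Nat) : Int) by push_cast; ring]
    rw [ih (a + 1) _ c (by simp [List.length_take]; omega)]
    have htke : (counts.take a).length = a := by simp [List.length_take]; omega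
    have htake : (counts.take a ++ (counts[a] + c) :: counts.drop (a + 1)).take (a + 1)
        = counts.take a ++ [counts[a] + c] := by
      rw [List.take_append, List.take_of_length_le (by omega), htke,
        show a + 1 - a = 1 by omega]
      rfl
    have hdrop : (counts.take a ++ (counts[a] + c) :: counts.drop (a + 1)).drop (a + 1)
        = counts.drop (a + 1) := by
      rw [List.drop_append, List.drop_eq_nil_of_le (by omega), List.nil_append, htke,
        show a + 1 - a = 1 by omega]
      rfl
    rw [htake, hdrop]
    rw [List.drop_eq_getElem_cons ha]
    simp [bumpA]

theorem winsStep_le (st : PySem.Set Int × Bool × Int) (t : String) : st.2.2 ≤ (tokStepB st t).2.2 := by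
  simp only [tokStepB]
  split_ifs <;> simp

theorem winsOf_nonneg (line : String) : 0 ≤ winsOf line := by
  rw [winsOf]
  generalize (PySem.List.slice ((PySem.Str.split? line " ").getD []) (some 2) none) = toks
  have key : ∀ (toks : List String) (st : PySem.Set Int × Bool × Int),
      st.2.2 ≤ (toks.foldl tokStepB st).2.2 := by
    intro toks
    induction toks with
    | nil => intro st; simp
    | cons t ts ih => intro st; exact le_trans (winsStep_le st t) (ih (tokStepB st t))
  exact le_trans (by norm_num) (key toks (PySem.Set.empty, false, 0))

theorem outerB_eq (ws : List Int) :
    ∀ (s : Nat) (counts : List Int) (t : Int) (n : Int),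
      n = (counts.length : Int) → s + ws.length = counts.length → (∀ w ∈ ws, 0 ≤ w) →
      ((PySem.List.enumerate ws (s : Int)).foldl (lineStepB n) (counts, t)).2
        = t + modelF ws (counts.drop s) := by
  induction ws with
  | nil => intro s counts t n _ _ _; simp [PySem.List.enumerate, modelF]
  | cons w ws ih =>
    intro s counts t n hn hlen hnn
    have hs : s < counts.length := by simp at hlen; omega
    rw [PySem.List.enumerate_cons]
    simp only [List.foldl]
    have hw0 : 0 ≤ w := hnn w (List.mem_cons_self ..)
    have hc : PySem.List.pyGetD counts (s : Int) 0 = counts[s] := by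
      rw [PySem.List.pyGetD_natCast, List.getD_eq_getElem _ _ hs]
    set m : Nat := min (counts.length - (s + 1)) w.toNat with hm
    have hb : min n ((s : Int) + 1 + w) = (((s + 1 : Nat)) : Int) + (m : Int) := by
      rw [hn, hm]; push_cast; omega
    have hstep : lineStepB n (counts, t) ((s : Int), w)
        = (counts.take (s + 1) ++ bumpA (counts.drop (s + 1)) m counts[s], t + counts[s]) := by
      simp only [lineStepB, hc, hb]
      rw [show (s : Int) + 1 = ((s + 1 : Nat) : Int) by push_cast; ring]
      rw [innerB_eq m (s + 1) counts counts[s] (by omega)]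
    rw [hstep]
    rw [show (s : Int) + 1 = ((s + 1 : Nat) : Int) by push_cast; ring]
    have htke : (counts.take (s + 1)).length = s + 1 := by simp [List.length_take]; omega
    have hlen' : (counts.take (s + 1) ++ bumpA (counts.drop (s + 1)) m counts[s]).length
        = counts.length := by
      simp [length_bumpA, List.length_take]; omega
    rw [ih (s + 1) _ (t + counts[s]) n (by rw [hlen']; exact hn)
      (by rw [hlen']; simp at hlen; omega)
      (fun x hx => hnn x (List.mem_cons_of_mem _ hx))]
    have hdrop : (counts.take (s + 1) ++ bumpA (counts.drop (s + 1)) m counts[s]).drop (s + 1)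
        = bumpA (counts.drop (s + 1)) m counts[s] := by
      rw [List.drop_append, List.drop_eq_nil_of_le (by omega), List.nil_append, htke,
        show s + 1 - (s + 1) = 0 by omega]
      rfl
    rw [hdrop]
    rw [List.drop_eq_getElem_cons hs]
    simp only [modelF]
    rw [bumpA_min (counts.drop (s + 1)) w.toNat counts[s]]
    rw [show min w.toNat (counts.drop (s + 1)).length = m by
      simp [List.length_drop, hm]; omega]
    ring

-- ===== VERDICT (by name: the statement is the Claim_ definition above) =====
theorem part2_spec : Claim_equal_part2 := by
  intro data hdom hpre
  obtain ⟨hne, -⟩ := hpre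
  show part2 data = part2_alt data
  rw [part2, part2_alt, if_neg hne, if_neg hne]
  rw [foldA_eq]
  have h := outerB_eq (data.map winsOf) 0 (List.replicate data.length 1) 0 (data.length)
    (by simp) (by simp) (by intro x hx; obtain ⟨l, -, rfl⟩ := List.mem_map.1 hx; exact winsOf_nonneg l)
  simp only [Nat.cast_zero, List.drop_zero, zero_add] at h
  rw [h, zero_add]
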